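-- pv_equiv track=rewrite | github.com/kzorina/agimus_controller | agimus_controller/agimus_controller/trajectory.py | compute_horizon_indexes
-- ===== SOURCE A (Python) =====
-- def compute_horizon_indexes(dt_factor_n_seq: list[tuple[int, int]]):
--     indexes = [
--         0,
--     ] * sum(sn for _, sn in dt_factor_n_seq)
--     i = 0
--     for factor, sn in dt_factor_n_seq:
--         for _ in range(sn):
--             if i == 0:
--                 indexes[i] = 0
--             else:
--                 indexes[i] = factor + indexes[i - 1]
--             i += 1
--     # check first time step
--     assert indexes[0] == 0 and "First time step must be 0"
--     # increasing time steps
--     assert all(t0 <= t1 for t0, t1 in zip(indexes[:-1], indexes[1:]))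
--     return indexes
-- ===== SOURCE B (Python) =====
-- def compute_horizon_indexes(dt_factor_n_seq: list[tuple[int, int]]):
--     # blockwise closed form: each pair contributes an arithmetic progression
--     # base + factor*k, computed directly from the block's base (no per-step
--     # running accumulator across the whole sequence)
--     indexes = []
--     for factor, sn in dt_factor_n_seq:
--         if not indexes:
--             indexes.extend(factor * k for k in range(sn))
--         else:
--             base = indexes[-1]
--             indexes.extend(base + factor * k for k in range(1, sn + 1))
--     # check first time step
--     assert indexes[0] == 0 and "First time step must be 0"
--     # increasing time steps
--     assert all(t0 <= t1 for t0, t1 in zip(indexes[:-1], indexes[1:]))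
--     return indexes
-- ===== Notes on version B (the rewrite author's own statement) =====
-- stated objective: alternative
-- what changed: Replaces the pre-sized zero array filled step by step with a running accumulator by a per-block closed form: each (factor, sn) pair appends the arithmetic progression base + factor*k computed by multiplication from the previous block's last value.
import Mathlib
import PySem

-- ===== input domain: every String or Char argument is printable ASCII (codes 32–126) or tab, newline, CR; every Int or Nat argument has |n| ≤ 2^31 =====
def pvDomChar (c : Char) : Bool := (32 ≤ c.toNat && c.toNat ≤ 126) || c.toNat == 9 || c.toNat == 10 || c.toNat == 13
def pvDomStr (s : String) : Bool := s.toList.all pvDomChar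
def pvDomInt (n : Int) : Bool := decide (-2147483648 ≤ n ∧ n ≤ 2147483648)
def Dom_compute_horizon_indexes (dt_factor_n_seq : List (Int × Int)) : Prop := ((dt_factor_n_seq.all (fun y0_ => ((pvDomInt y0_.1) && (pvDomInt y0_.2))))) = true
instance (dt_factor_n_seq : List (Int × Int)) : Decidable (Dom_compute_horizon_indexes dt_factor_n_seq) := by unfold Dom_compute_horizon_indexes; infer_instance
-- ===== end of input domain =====

-- B replaces A's pre-sized zero array filled step by step with a running accumulator
-- by a per-block closed form: each (factor, sn) pair appends the arithmetic
-- progression base + factor*k computed by multiplication from the previous block's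
-- last value; both validation asserts are kept.

-- ===== PORT A =====
-- one iteration of A's inner loop body: writes indexes[i] and bumps i.
-- indexes[i] = v uses pySetD and indexes[i-1] uses pyGetD; exact under Pre_
-- (there i is always in range; Python's IndexError cases are outside Pre_).
def chiStep (factor : Int) (st : List Int × Int) : List Int × Int :=
  if st.2 = 0 then (PySem.List.pySetD st.1 st.2 0, st.2 + 1)
  else (PySem.List.pySetD st.1 st.2 (factor + PySem.List.pyGetD st.1 (st.2 - 1) 0), st.2 + 1)

def compute_horizon_indexes (dt_factor_n_seq : List (Int × Int)) : List Int :=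
  -- indexes = [0] * sum(sn for _, sn in dt_factor_n_seq)
  let indexes : List Int := List.replicate ((dt_factor_n_seq.map Prod.snd).sum).toNat 0
  -- i = 0; for factor, sn in …: for _ in range(sn): …
  (dt_factor_n_seq.foldl
      (fun st (p : Int × Int) => (List.range p.2.toNat).foldl (fun st _ => chiStep p.1 st) st)
      (indexes, 0)).1
  -- the two asserts hold on Pre_ and do not change the returned value

-- ===== PORT B =====
-- one iteration of B's loop body: append one block, an arithmetic progression.
-- indexes[-1] is pyGetD indexes (-1) 0, exact since that branch has indexes ≠ [].
def chiBlock (indexes : List Int) (p : Int × Int) : List Int :=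
  if indexes.isEmpty then
    indexes ++ (PySem.List.pyRange 0 p.2 1).map (fun k => p.1 * k)
  else
    indexes ++ (PySem.List.pyRange 1 (p.2 + 1) 1).map
      (fun k => PySem.List.pyGetD indexes (-1) 0 + p.1 * k)

def compute_horizon_indexes_alt (dt_factor_n_seq : List (Int × Int)) : List Int :=
  dt_factor_n_seq.foldl chiBlock []
  -- the two asserts hold on Pre_ and do not change the returned value

-- ===== PRECONDITION & SPEC =====
-- Pre_ = exactly where A returns: a negative sn or an all-zero/empty sn list makes A
-- raise IndexError, and a negative increment after the first step trips A's
-- monotonicity assert (AssertionError).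
def Pre_compute_horizon_indexes (dt_factor_n_seq : List (Int × Int)) : Prop :=
  (∀ p ∈ dt_factor_n_seq, 0 ≤ p.2) ∧
  dt_factor_n_seq.filter (fun p => decide (0 < p.2)) ≠ [] ∧
  (∀ p ∈ (dt_factor_n_seq.filter (fun p => decide (0 < p.2))).tail, 0 ≤ p.1) ∧
  (∀ p ∈ (dt_factor_n_seq.filter (fun p => decide (0 < p.2))).take 1, 0 ≤ p.1 ∨ p.2 = 1)
instance (dt_factor_n_seq : List (Int × Int)) : Decidable (Pre_compute_horizon_indexes dt_factor_n_seq) := by unfold Pre_compute_horizon_indexes; infer_instance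

def pvWitness_compute_horizon_indexes : (List (Int × Int)) := [(-3, 1), (2, 2), (0, 1), (5, 3)]

def Spec_compute_horizon_indexes (dt_factor_n_seq : List (Int × Int)) (out : List Int) : Prop := out = compute_horizon_indexes_alt dt_factor_n_seq
instance (dt_factor_n_seq : List (Int × Int)) (out : List Int) : Decidable (Spec_compute_horizon_indexes dt_factor_n_seq out) := by unfold Spec_compute_horizon_indexes; infer_instance

-- ===== CLAIM (what is proved, stated in full; the proofs are below) =====
def Claim_equal_compute_horizon_indexes : Prop := ∀ (dt_factor_n_seq : List (Int × Int)), Dom_compute_horizon_indexes dt_factor_n_seq → Pre_compute_horizon_indexes dt_factor_n_seq → Spec_compute_horizon_indexes dt_factor_n_seq (compute_horizon_indexes dt_factor_n_seq)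

-- ===== LEMMAS AND PROOFS =====

-- prefix sums starting from t (the common characterisation of both results)
def chiScan (t : Int) : List Int → List Int
  | [] => []
  | d :: ds => (t + d) :: chiScan (t + d) ds

def chiFlat (xs : List (Int × Int)) : List Int :=
  xs.flatMap (fun p => List.replicate p.2.toNat p.1)

-- an arithmetic-progression block IS a prefix-sum scan of a constant list
theorem chiRange_map (n : Nat) : ∀ (a t f : Int),
    (PySem.List.pyRange a (a + n) 1).map (fun k => t + f * k)
      = chiScan (t + f * (a - 1)) (List.replicate n f) := by
  induction n with
  | zero => intro a t f; simp [PySem.List.pyRange_one_eq_nil, chiScan]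
  | succ n ih =>
    intro a t f
    rw [PySem.List.pyRange_one_cons (by omega)]
    have h : a + ((n + 1 : Nat) : Int) = (a + 1) + (n : Int) := by push_cast; ring
    rw [h]
    simp only [List.map_cons, List.replicate_succ, chiScan, ih (a + 1) t f]
    congr 1
    · ring
    · congr 1
      ring

theorem chiScan_append (l1 l2 : List Int) : ∀ t,
    chiScan t (l1 ++ l2) = chiScan t l1 ++ chiScan (t + l1.sum) l2 := by
  induction l1 with
  | nil => intro t; simp [chiScan]
  | cons d ds ih => intro t; simp [chiScan, ih, add_assoc]

theorem chiScan_getLast? (l : List Int) (hl : l ≠ []) : ∀ t,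
    (chiScan t l).getLast? = some (t + l.sum) := by
  induction l with
  | nil => exact absurd rfl hl
  | cons d ds ih =>
    intro t
    cases hds : ds with
    | nil => simp [chiScan]
    | cons e es =>
      have := ih (by simp [hds]) (t + d)
      rw [hds] at this
      simp only [chiScan, List.getLast?_cons_cons] at this ⊢
      rw [this]
      simp [add_assoc]

-- a block step from a nonempty accumulator appends the scan of the block
theorem chiBlock_nonempty (acc : List Int) (t : Int) (hl : acc.getLast? = some t)
    (p : Int × Int) :
    chiBlock acc p = acc ++ chiScan t (List.replicate p.2.toNat p.1) := by
  have hne : acc ≠ [] := by intro h; rw [h] at hl; simp at hl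
  unfold chiBlock
  rw [if_neg (by simp [hne])]
  have hget : PySem.List.pyGetD acc (-1) 0 = t := by
    rw [PySem.List.pyGetD_neg_one acc 0 hne, List.getLast_eq_iff_getLast?_eq_some]
    exact hl
  rcases (by omega : p.2 ≤ 0 ∨ 0 < p.2) with hsn | hsn
  · rw [PySem.List.pyRange_one_eq_nil (by omega)]
    simp [Int.toNat_of_nonpos hsn, chiScan]
  · have h1 : p.2 + 1 = 1 + (p.2.toNat : Int) := by omega
    rw [h1, hget]
    have := chiRange_map p.2.toNat 1 t p.1
    simp only [this]
    norm_num

-- B's fold from a nonempty accumulator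
theorem chiB_nonempty (xs : List (Int × Int)) : ∀ (acc : List Int) (t : Int),
    acc.getLast? = some t →
    xs.foldl chiBlock acc = acc ++ chiScan t (chiFlat xs) := by
  induction xs with
  | nil => intro acc t _; simp [chiFlat, chiScan]
  | cons p ps ih =>
    intro acc t hl
    simp only [List.foldl_cons]
    rw [chiBlock_nonempty acc t hl p]
    cases hrep : List.replicate p.2.toNat p.1 with
    | nil =>
      rw [chiScan]
      simp only [List.append_nil]
      rw [ih acc t hl]
      simp [chiFlat, hrep]
    | cons d ds =>
      have hlast : (acc ++ chiScan t (d :: ds)).getLast? = some (t + (d :: ds).sum) := by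
        rw [List.getLast?_append_of_ne_nil acc (by simp [chiScan])]
        exact chiScan_getLast? (d :: ds) (by simp) t
      rw [ih _ _ hlast]
      simp only [chiFlat, List.flatMap_cons, hrep, List.append_assoc]
      rw [chiScan_append]

-- B's fold from the empty accumulator = the scan with the first increment zeroed
theorem chiB_empty (xs : List (Int × Int)) :
    xs.foldl chiBlock []
      = match chiFlat xs with
        | [] => ([] : List Int)
        | _ :: ds => 0 :: chiScan 0 ds := by
  induction xs with
  | nil => simp [chiFlat]
  | cons p ps ih =>
    simp only [List.foldl_cons]
    have hblock : chiBlock [] p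
        = (PySem.List.pyRange 0 p.2 1).map (fun k => p.1 * k) := by
      unfold chiBlock; simp
    rcases (by omega : p.2 ≤ 0 ∨ 0 < p.2) with hsn | hsn
    · rw [hblock, PySem.List.pyRange_one_eq_nil (by omega)]
      simp only [List.map_nil]
      rw [ih]
      simp [chiFlat, Int.toNat_of_nonpos hsn]
    · -- first block nonempty: it is 0 :: chiScan 0 (replicate (n-1) f)
      obtain ⟨m, hm⟩ : ∃ m : Nat, p.2.toNat = m + 1 := ⟨p.2.toNat - 1, by omega⟩
      have hb2 : chiBlock [] p = chiScan (-p.1) (List.replicate p.2.toNat p.1) := by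
        have h := chiRange_map p.2.toNat 0 0 p.1
        norm_num at h
        rw [hblock, show p.2 = max p.2 0 by omega, h]
        congr 2
        omega
      have hscan : chiScan (-p.1) (List.replicate p.2.toNat p.1)
          = 0 :: chiScan 0 (List.replicate m p.1) := by
        rw [hm, List.replicate_succ]
        simp [chiScan]
      have hlast : (chiBlock [] p).getLast? = some (-p.1 + (p.2.toNat : Int) * p.1) := by
        rw [hb2, chiScan_getLast? _ (by simp [hm]) (-p.1)]
        simp [List.sum_replicate, hm]
      rw [chiB_nonempty ps _ _ hlast, hb2, hscan,
        show -p.1 + (p.2.toNat : Int) * p.1 = 0 + (List.replicate m p.1).sum by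
          simp [List.sum_replicate, hm]; ring]
      simp only [chiFlat, List.flatMap_cons, hm, List.replicate_succ]
      simp [chiScan_append]

theorem chiAlt_eq_scan (xs : List (Int × Int)) :
    compute_horizon_indexes_alt xs
      = match chiFlat xs with
        | [] => ([] : List Int)
        | _ :: ds => 0 :: chiScan 0 ds :=
  chiB_empty xs

-- A's inner loop over range sn with constant factor = fold over replicate sn factor
theorem chiRange_eq_replicate (f : Int) (n : Nat) (st : List Int × Int) :
    (List.range n).foldl (fun st _ => chiStep f st) st
      = (List.replicate n f).foldl (fun st d => chiStep d st) st := by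
  induction n generalizing st with
  | zero => rfl
  | succ n ih =>
    rw [List.range_succ, List.replicate_succ']
    simp only [List.foldl_append, List.foldl_cons, List.foldl_nil]
    rw [ih]

-- A's double loop = single fold over the flat increment list
theorem chiA_eq_flat (xs : List (Int × Int)) (st : List Int × Int) :
    xs.foldl (fun st (p : Int × Int) => (List.range p.2.toNat).foldl (fun st _ => chiStep p.1 st) st) st
      = (chiFlat xs).foldl (fun st d => chiStep d st) st := by
  induction xs generalizing st with
  | nil => rfl
  | cons p ps ih =>
    simp only [List.foldl_cons, chiFlat, List.flatMap_cons, List.foldl_append]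
    rw [chiRange_eq_replicate]
    exact ih _

theorem pySetD_append (done : List Int) (x v : Int) (rest : List Int) :
    PySem.List.pySetD (done ++ x :: rest) (done.length : Int) v = done ++ v :: rest := by
  have h : PySem.List.pyIdx? (done ++ x :: rest).length (done.length : Int) = some done.length := by
    simp [PySem.List.pyIdx?]
  simp only [PySem.List.pySetD, PySem.List.pySet?, h, Option.map_some, Option.getD_some]
  rw [List.set_append_right _ _ (by omega)]
  simp

-- main invariant for A's flat fold: having produced done ++ [t], the remaining
-- increments l overwrite the next l.length zeros with chiScan t l
theorem chiA_invariant (l : List Int) (done : List Int) (t : Int) :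
    l.foldl (fun st d => chiStep d st)
        ((done ++ [t]) ++ List.replicate l.length 0, ((done ++ [t]).length : Int))
      = ((done ++ [t]) ++ chiScan t l, ((done ++ [t]).length : Int) + l.length) := by
  induction l generalizing done t with
  | nil => simp [chiScan]
  | cons d ds ih =>
    simp only [List.foldl_cons, List.length_cons, List.replicate_succ]
    have hstep : chiStep d ((done ++ [t]) ++ 0 :: List.replicate ds.length 0, ((done ++ [t]).length : Int))
        = (((done ++ [t]) ++ [t + d]) ++ List.replicate ds.length 0, (((done ++ [t]) ++ [t + d]).length : Int)) := by
      unfold chiStep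
      have hne' : (((done ++ [t]).length : Int)) ≠ 0 := by simp only [List.length_append, List.length_cons, List.length_nil]; push_cast; omega
      rw [if_neg hne']
      have hget : PySem.List.pyGetD ((done ++ [t]) ++ 0 :: List.replicate ds.length 0)
          (((done ++ [t]).length : Int) - 1) 0 = t := by
        have harr : (done ++ [t]) ++ 0 :: List.replicate ds.length 0
            = done ++ t :: (0 :: List.replicate ds.length 0) := by simp
        have hidx : (((done ++ [t]).length : Int)) - 1 = ((done.length : Nat) : Int) := by
          simp
        rw [harr, hidx, PySem.List.pyGetD_natCast]
        simp [List.getD]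
      rw [hget, pySetD_append]
      refine Prod.ext ?_ ?_
      · simp [add_comm]
      · simp; omega
    rw [hstep, ih]
    simp [chiScan]
    ring

theorem chiSum_nonneg (xs : List (Int × Int)) (h : ∀ p ∈ xs, 0 ≤ p.2) :
    0 ≤ (xs.map Prod.snd).sum := by
  induction xs with
  | nil => simp
  | cons p ps ih =>
    have := h p (by simp)
    have := ih (fun q hq => h q (by simp [hq]))
    simp only [List.map_cons, List.sum_cons]
    omega

-- length of the flat list = (sum of sn).toNat when all sn ≥ 0
theorem chiFlat_length (xs : List (Int × Int)) (h : ∀ p ∈ xs, 0 ≤ p.2) :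
    (chiFlat xs).length = ((xs.map Prod.snd).sum).toNat := by
  induction xs with
  | nil => rfl
  | cons p ps ih =>
    have hp : 0 ≤ p.2 := h p (by simp)
    have hps : ∀ q ∈ ps, 0 ≤ q.2 := fun q hq => h q (by simp [hq])
    have hsum := chiSum_nonneg ps hps
    simp only [chiFlat, List.flatMap_cons, List.length_append, List.length_replicate,
      List.map_cons, List.sum_cons]
    have hih := ih hps
    simp only [chiFlat] at hih
    omega

-- pairs with sn = 0 contribute nothing to the flat increment list
theorem chiFlat_filter (xs : List (Int × Int)) (h : ∀ p ∈ xs, 0 ≤ p.2) :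
    chiFlat xs = chiFlat (xs.filter (fun p => decide (0 < p.2))) := by
  induction xs with
  | nil => rfl
  | cons p ps ih =>
    have hp := h p (by simp)
    have ihh := ih (fun q hq => h q (by simp [hq]))
    by_cases h2 : 0 < p.2
    · simp only [chiFlat, List.filter_cons, decide_eq_true h2, if_true, List.flatMap_cons] at ihh ⊢
      simp only [ihh]
    · have h0 : p.2.toNat = 0 := by omega
      simp only [chiFlat, List.filter_cons, List.flatMap_cons, h0, List.replicate_zero,
        List.nil_append, decide_eq_false h2] at ihh ⊢
      simpa using ihh

-- ===== VERDICT (by name: the statement is the Claim_ definition above) =====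
theorem compute_horizon_indexes_spec : Claim_equal_compute_horizon_indexes := by
  intro xs _ hpre
  obtain ⟨hsn, hfil, -, -⟩ := hpre
  have hne : chiFlat xs ≠ [] := by
    rw [chiFlat_filter xs hsn]
    cases hf : xs.filter (fun p => decide (0 < p.2)) with
    | nil => exact absurd hf hfil
    | cons q t =>
      have hq : 0 < q.2 := by
        have hmem : q ∈ xs.filter (fun p => decide (0 < p.2)) := by
          rw [hf]; exact List.mem_cons_self
        simpa using (List.mem_filter.mp hmem).2
      intro hnil
      have hl := congrArg List.length hnil
      simp [chiFlat] at hl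
      omega
  unfold Spec_compute_horizon_indexes
  rw [chiAlt_eq_scan]
  show compute_horizon_indexes xs = _
  simp only [compute_horizon_indexes]
  rw [chiA_eq_flat]
  cases hflat : chiFlat xs with
  | nil => exact absurd hflat hne
  | cons d ds =>
    have hlen : ((xs.map Prod.snd).sum).toNat = ds.length + 1 := by
      rw [← chiFlat_length xs hsn, hflat]; simp
    rw [hlen]
    -- first step: i = 0 writes 0 at position 0
    simp only [List.foldl_cons]
    have hstep0 : chiStep d (List.replicate (ds.length + 1) 0, (0 : Int))
        = ([0] ++ List.replicate ds.length 0, ((List.length [0] : Nat) : Int)) := by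
      unfold chiStep
      simp [PySem.List.pySetD, PySem.List.pySet?, PySem.List.pyIdx?, List.replicate_succ]
    rw [hstep0]
    have h2 := chiA_invariant ds [] 0
    simp at h2
    simp [h2]
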